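-- pv_equiv track=rewrite | github.com/dongwoo46/TIL | 개인 python 알고리즘 공부/SWEA/202302/20230209/stringcount_4865.py | alphabet_count
-- ===== SOURCE A (Python) =====
-- def alphabet_count(str1,str2):
--
--     max_cnt = 0
--     for s1 in str1:
--         cnt = 0
--         for s2 in str2:
--             if s1 == s2:
--                 cnt += 1
--             if max_cnt <cnt:
--                 max_cnt = cnt
--     return max_cnt
-- ===== SOURCE B (Python) =====
-- def alphabet_count(str1, str2):
--     freq = {}
--     for ch in str2:
--         freq[ch] = freq.get(ch, 0) + 1
--     s1 = set(str1)
--     return max((v for c, v in freq.items() if c in s1), default=0)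
-- ===== Notes on version B (the rewrite author's own statement) =====
-- stated objective: faster
-- what changed: Instead of counting str2 once per character of str1 (nested loops), B builds a frequency dict of str2 in one pass and takes the max count over its distinct keys that lie in set(str1), with default 0.
import Mathlib
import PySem

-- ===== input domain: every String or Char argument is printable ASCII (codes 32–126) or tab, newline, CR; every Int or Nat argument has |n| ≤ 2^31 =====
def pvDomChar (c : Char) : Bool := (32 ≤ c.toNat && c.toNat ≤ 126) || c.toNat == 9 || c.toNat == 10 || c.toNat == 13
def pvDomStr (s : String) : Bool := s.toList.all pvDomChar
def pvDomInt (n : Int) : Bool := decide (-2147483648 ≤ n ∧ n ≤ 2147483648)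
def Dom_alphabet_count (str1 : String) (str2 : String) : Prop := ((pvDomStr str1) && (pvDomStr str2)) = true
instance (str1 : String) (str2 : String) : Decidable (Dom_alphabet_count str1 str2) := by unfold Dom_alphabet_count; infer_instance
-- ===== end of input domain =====

-- B replaces A's nested per-str1-char scan of str2 with a one-pass frequency dict of str2
-- and a max over its distinct keys filtered by membership in set(str1) (asymptotically faster).


-- ===== PORT A =====
-- literal transliteration: outer loop over str1, inner loop over str2 carrying (cnt, max_cnt)
def alphabet_count (str1 : String) (str2 : String) : Int :=
  str1.toList.foldl (fun max_cnt s1 =>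
    (str2.toList.foldl (fun (st : Int × Int) s2 =>
      let cnt := if s1 == s2 then st.1 + 1 else st.1
      (cnt, if st.2 < cnt then cnt else st.2)) (0, max_cnt)).2) 0

-- ===== PORT B =====
-- literal transliteration of Source B: build freq dict over str2, set of str1, max of filtered counts with default 0
def alphabet_count_alt (str1 : String) (str2 : String) : Int :=
  let freq := str2.toList.foldl (fun d ch => d.insert ch (d.getD ch 0 + 1)) PySem.Dict.empty
  let s1 : PySem.Set Char := PySem.Set.ofList str1.toList
  PySem.List.maxD ((freq.items.filter (fun p => s1.contains p.1)).map (·.2)) (fun v => v) 0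

-- ===== PRECONDITION & SPEC =====
def Spec_alphabet_count (str1 : String) (str2 : String) (out : Int) : Prop := out = alphabet_count_alt str1 str2
instance (str1 : String) (str2 : String) (out : Int) : Decidable (Spec_alphabet_count str1 str2 out) := by unfold Spec_alphabet_count; infer_instance

-- ===== CLAIM (what is proved, stated in full; the proofs are below) =====
def Claim_equal_alphabet_count : Prop := ∀ (str1 : String) (str2 : String), Dom_alphabet_count str1 str2 → Spec_alphabet_count str1 str2 (alphabet_count str1 str2)

-- ===== LEMMAS AND PROOFS =====

-- A's inner loop from state (c, m): cnt ends at c + count, max_cnt at max m (c + count)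
theorem pv_inner_loop (l : List Char) (s1 : Char) (c m : Int) (h : c ≤ m) :
    l.foldl (fun (st : Int × Int) s2 =>
      let cnt := if s1 == s2 then st.1 + 1 else st.1
      (cnt, if st.2 < cnt then cnt else st.2)) (c, m)
    = (c + (l.count s1 : Int), max m (c + (l.count s1 : Int))) := by
  induction l generalizing c m with
  | nil => simp [max_eq_left h]
  | cons x t ih =>
    simp only [List.foldl_cons, List.count_cons]
    by_cases hx : s1 = x
    · subst hx
      simp only [beq_self_eq_true, if_true]
      have h1 : c + 1 ≤ (if m < c + 1 then c + 1 else m) := by split <;> omega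
      rw [ih (c + 1) _ h1]
      refine Prod.ext ?_ ?_
      · simp; ring
      · simp only [max_def]
        push_cast
        split_ifs <;> omega
    · have hb : (s1 == x) = false := by simp [hx]
      have hb2 : (x == s1) = false := by simp [Ne.symm hx]
      simp only [hb, hb2, if_false, Bool.false_eq_true]
      have hmc : (if m < c then c else m) = m := by omega
      rw [hmc, ih c m h]
      simp

-- A is the running max of count(c, str2) over c in str1
theorem pv_A_eq_fold (str1 str2 : String) :
    alphabet_count str1 str2
    = str1.toList.foldl (fun m c => max m ((str2.toList.count c : Int))) 0 := by
  unfold alphabet_count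
  have key : ∀ (l : List Char) (m : Int), 0 ≤ m →
      l.foldl (fun max_cnt s1 =>
        (str2.toList.foldl (fun (st : Int × Int) s2 =>
          let cnt := if s1 == s2 then st.1 + 1 else st.1
          (cnt, if st.2 < cnt then cnt else st.2)) (0, max_cnt)).2) m
      = l.foldl (fun m c => max m ((str2.toList.count c : Int))) m := by
    intro l
    induction l with
    | nil => intro m _; rfl
    | cons x t ih =>
      intro m hm
      simp only [List.foldl_cons]
      rw [pv_inner_loop str2.toList x 0 m hm]
      simp only [zero_add]
      exact ih _ (le_trans hm (le_max_left _ _))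
  exact key str1.toList 0 le_rfl

-- the filtered count list B takes its max over
def pvL (str1 str2 : String) : List Int :=
  (((PySem.Set.ofList str2.toList).filter
      (fun k => (PySem.Set.ofList str1.toList).contains k)).map
    (fun k => (str2.toList.count k : Int)))

theorem pv_B_eq_maxD (str1 str2 : String) :
    alphabet_count_alt str1 str2 = PySem.List.maxD (pvL str1 str2) (fun v => v) 0 := by
  unfold alphabet_count_alt pvL
  simp only [PySem.Dict.foldl_insert_getD_add_one_eq_counter, PySem.Dict.items_counter,
    List.filter_map, List.map_map]
  rfl

-- every element of pvL is count(k, str2) for some k ∈ str1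
theorem pv_mem_pvL (str1 str2 : String) (v : Int) (hv : v ∈ pvL str1 str2) :
    ∃ k, k ∈ str1.toList ∧ v = (str2.toList.count k : Int) := by
  unfold pvL at hv
  rcases List.mem_map.mp hv with ⟨k, hk, hkv⟩
  rcases List.mem_filter.mp hk with ⟨_, hc⟩
  exact ⟨k, (PySem.Set.mem_ofList _ _).mp ((PySem.Set.contains_iff _ _).mp hc), hkv.symm⟩

-- count(k, str2) for k ∈ str1 is bounded by any upper bound of pvL ∪ {0}
theorem pv_count_mem_pvL (str1 str2 : String) (k : Char)
    (h1 : k ∈ str1.toList) (h2 : k ∈ str2.toList) :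
    (str2.toList.count k : Int) ∈ pvL str1 str2 := by
  unfold pvL
  refine List.mem_map.mpr ⟨k, List.mem_filter.mpr ⟨(PySem.Set.mem_ofList _ _).mpr h2, ?_⟩, rfl⟩
  exact (PySem.Set.contains_iff _ _).mpr ((PySem.Set.mem_ofList _ _).mpr h1)

theorem pv_foldl_max_le (l : List Int) (a b : Int) (ha : a ≤ b)
    (h : ∀ x ∈ l, x ≤ b) : l.foldl max a ≤ b := by
  induction l generalizing a with
  | nil => exact ha
  | cons x t ih =>
    simp only [List.foldl_cons]
    exact ih _ (max_le ha (h x (List.mem_cons_self))) (fun y hy => h y (List.mem_cons_of_mem _ hy))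

-- maxD with default 0 over a list of nonnegative values is foldl max 0
theorem pv_maxD_eq_foldl (l : List Int) (h : ∀ x ∈ l, 0 ≤ x) :
    PySem.List.maxD l (fun v => v) 0 = l.foldl max 0 := by
  cases l with
  | nil => rfl
  | cons x t =>
    unfold PySem.List.maxD
    rw [PySem.List.max?_id_cons]
    simp only [Option.getD_some, List.foldl_cons]
    have : max (0 : Int) x = x := max_eq_right (h x (List.mem_cons_self))
    rw [this]

theorem pv_main (str1 str2 : String) :
    alphabet_count str1 str2 = alphabet_count_alt str1 str2 := by
  have hLnn : ∀ x ∈ pvL str1 str2, (0 : Int) ≤ x := by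
    intro x hx
    rcases pv_mem_pvL str1 str2 x hx with ⟨k, _, rfl⟩
    positivity
  rw [pv_A_eq_fold, pv_B_eq_maxD, pv_maxD_eq_foldl _ hLnn]
  have hA : str1.toList.foldl (fun m c => max m ((str2.toList.count c : Int))) 0
      = (str1.toList.map (fun c => (str2.toList.count c : Int))).foldl max 0 := by
    rw [List.foldl_map]
  rw [hA]
  apply le_antisymm
  · -- A ≤ B
    apply pv_foldl_max_le
    · exact (PySem.List.le_foldl_max (pvL str1 str2) 0).1
    · intro x hx
      rcases List.mem_map.mp hx with ⟨k, hk, rfl⟩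
      by_cases h2 : k ∈ str2.toList
      · exact (PySem.List.le_foldl_max (pvL str1 str2) 0).2 _
          (pv_count_mem_pvL str1 str2 k hk h2)
      · have : str2.toList.count k = 0 := List.count_eq_zero.mpr h2
        rw [this]
        exact_mod_cast (PySem.List.le_foldl_max (pvL str1 str2) 0).1
  · -- B ≤ A
    apply pv_foldl_max_le
    · exact (PySem.List.le_foldl_max _ 0).1
    · intro x hx
      rcases pv_mem_pvL str1 str2 x hx with ⟨k, hk, rfl⟩
      exact (PySem.List.le_foldl_max _ 0).2 _
        (List.mem_map.mpr ⟨k, hk, rfl⟩)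

-- ===== VERDICT (by name: the statement is the Claim_ definition above) =====
theorem alphabet_count_spec : Claim_equal_alphabet_count := by
  intro str1 str2 _
  unfold Spec_alphabet_count
  exact pv_main str1 str2
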